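-- pv_equiv track=rewrite | github.com/23z156-wq/gigshield | fix_final.py | check_brace_depth
-- ===== SOURCE A (Python) =====
-- def check_brace_depth(script_text):
--     depth = 0
--     in_str = None
--     escape = False
--     in_line_comment = False
--     prev_ch = ''
--     for ch in script_text:
--         if ch == '\n':
--             in_line_comment = False
--             prev_ch = ''
--             continue
--         if in_line_comment:
--             prev_ch = ch
--             continue
--         if escape:
--             escape = False
--             prev_ch = ch
--             continue
--         if ch == '\\' and in_str:
--             escape = True
--             prev_ch = ch
--             continue
--         if in_str:
--             if ch == in_str:
--                 in_str = None
--             prev_ch = ch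
--             continue
--         if ch in ('"', "'", '`'):
--             in_str = ch
--             prev_ch = ch
--             continue
--         if prev_ch == '/' and ch == '/':
--             in_line_comment = True
--             prev_ch = ch
--             continue
--         if ch == '{':
--             depth += 1
--         elif ch == '}':
--             depth -= 1
--         prev_ch = ch
--     return depth
-- ===== SOURCE B (Python) =====
-- def check_brace_depth(script_text):
--     depth = 0
--     quote = None
--     escaped = False
--     for line in script_text.split('\n'):
--         i = 0
--         n = len(line)
--         while i < n:
--             c = line[i]
--             if escaped:
--                 escaped = False
--             elif quote is not None:
--                 if c == '\\':
--                     escaped = True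
--                 elif c == quote:
--                     quote = None
--             elif c in '"\'`':
--                 quote = c
--             elif c == '/' and i + 1 < n and line[i + 1] == '/':
--                 break  # line comment: skip the rest of the line
--             elif c == '{':
--                 depth += 1
--             elif c == '}':
--                 depth -= 1
--             i += 1
--     return depth
-- ===== Notes on version B (the rewrite author's own statement) =====
-- stated objective: simpler
-- what changed: Replaces A's single character loop over five mode flags (in_str/escape/in_line_comment/prev_ch) with a line-by-line scanner: split the text on newlines, scan each line by index, detect a line comment by one-character lookahead and end it with a break, carrying only (depth, quote, escaped) across lines.
import Mathlib
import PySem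

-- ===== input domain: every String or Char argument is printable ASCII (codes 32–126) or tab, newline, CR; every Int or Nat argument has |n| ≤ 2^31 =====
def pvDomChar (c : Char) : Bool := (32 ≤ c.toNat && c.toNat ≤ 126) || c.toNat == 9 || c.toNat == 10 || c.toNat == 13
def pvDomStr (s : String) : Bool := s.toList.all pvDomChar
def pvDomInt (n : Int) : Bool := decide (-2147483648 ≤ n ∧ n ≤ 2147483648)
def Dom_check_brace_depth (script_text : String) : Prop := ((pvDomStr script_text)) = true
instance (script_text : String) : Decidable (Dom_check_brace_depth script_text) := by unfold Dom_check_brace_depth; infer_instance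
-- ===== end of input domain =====

-- B restructures A's flag-driven scan into a line-by-line scanner (split on '\n', comment = break
-- out of the line, '//' detected by lookahead instead of prev_ch tracking); objective: simpler.

-- ===== PORT A =====
-- literal transliteration of A's for-loop: state (depth, in_str, escape, in_line_comment, prev_ch),
-- Python's prev_ch string '' ported as the Lean String "".
def aLoop (depth : Int) (in_str : Option Char) (escape : Bool) (comment : Bool) (prev : String) :
    List Char → Int
  | [] => depth
  | ch :: rest =>
    if ch = '\n' then aLoop depth in_str escape false "" rest
    else if comment then aLoop depth in_str escape comment (String.singleton ch) rest
    else if escape then aLoop depth in_str false comment (String.singleton ch) rest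
    else if ch = '\\' ∧ in_str.isSome then aLoop depth in_str true comment (String.singleton ch) rest
    else if in_str.isSome then
      if some ch = in_str then aLoop depth none escape comment (String.singleton ch) rest
      else aLoop depth in_str escape comment (String.singleton ch) rest
    else if ch = '"' ∨ ch = '\'' ∨ ch = '`' then
      aLoop depth (some ch) escape comment (String.singleton ch) rest
    else if prev = "/" ∧ ch = '/' then aLoop depth in_str escape true (String.singleton ch) rest
    else if ch = '{' then aLoop (depth + 1) in_str escape comment (String.singleton ch) rest
    else if ch = '}' then aLoop (depth - 1) in_str escape comment (String.singleton ch) rest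
    else aLoop depth in_str escape comment (String.singleton ch) rest

def check_brace_depth (script_text : String) : Int :=
  aLoop 0 none false false "" script_text.toList

-- ===== PORT B =====
-- line[i] is ported as line.getD i ' '; every access is guarded by i < n, so the default is never read.
-- inner `while i < n` over one line; `break` on `//` returns the state immediately
def bLineLoop (line : List Char) (n i : Nat) (depth : Int) (quote : Option Char) (escaped : Bool) :
    Int × Option Char × Bool :=
  if i < n then
    let c := line.getD i ' '
    if escaped then bLineLoop line n (i + 1) depth quote false
    else if quote.isSome then
      if c = '\\' then bLineLoop line n (i + 1) depth quote true
      else if some c = quote then bLineLoop line n (i + 1) depth none escaped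
      else bLineLoop line n (i + 1) depth quote escaped
    else if c = '"' ∨ c = '\'' ∨ c = '`' then bLineLoop line n (i + 1) depth (some c) escaped
    else if c = '/' ∧ i + 1 < n ∧ line.getD (i + 1) ' ' = '/' then (depth, quote, escaped)
    else if c = '{' then bLineLoop line n (i + 1) (depth + 1) quote escaped
    else if c = '}' then bLineLoop line n (i + 1) (depth - 1) quote escaped
    else bLineLoop line n (i + 1) depth quote escaped
  else (depth, quote, escaped)
termination_by n - i
decreasing_by all_goals omega

-- `for line in script_text.split('\n')`, carrying (depth, quote, escaped) across lines
def check_brace_depth_alt (script_text : String) : Int :=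
  ((script_text.toList.splitOn '\n').foldl
    (fun (st : Int × Option Char × Bool) line => bLineLoop line line.length 0 st.1 st.2.1 st.2.2)
    (0, none, false)).1

-- ===== PRECONDITION & SPEC =====
def Spec_check_brace_depth (script_text : String) (out : Int) : Prop := out = check_brace_depth_alt script_text
instance (script_text : String) (out : Int) : Decidable (Spec_check_brace_depth script_text out) := by unfold Spec_check_brace_depth; infer_instance

-- ===== CLAIM (what is proved, stated in full; the proofs are below) =====
def Claim_equal_check_brace_depth : Prop := ∀ (script_text : String), Dom_check_brace_depth script_text → Spec_check_brace_depth script_text (check_brace_depth script_text)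

-- ===== LEMMAS AND PROOFS =====

-- structural form of bLineLoop on the remaining characters of the line
def bStruct : List Char → Int × Option Char × Bool → Int × Option Char × Bool
  | [], st => st
  | c :: rest, (d, q, e) =>
    if e then bStruct rest (d, q, false)
    else if q.isSome then
      if c = '\\' then bStruct rest (d, q, true)
      else if some c = q then bStruct rest (d, none, e)
      else bStruct rest (d, q, e)
    else if c = '"' ∨ c = '\'' ∨ c = '`' then bStruct rest (d, some c, e)
    else if c = '/' ∧ rest.head? = some '/' then (d, q, e)
    else if c = '{' then bStruct rest (d + 1, q, e)
    else if c = '}' then bStruct rest (d - 1, q, e)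
    else bStruct rest (d, q, e)

-- structural form of the whole line fold
def gLines : List (List Char) → Int × Option Char × Bool → Int
  | [], st => st.1
  | l :: ls, st => gLines ls (bStruct l st)

theorem bLineLoop_eq_bStruct_aux (k : Nat) : ∀ (xs : List Char) (i : Nat) (d : Int)
    (q : Option Char) (e : Bool), xs.length - i ≤ k →
    bLineLoop xs xs.length i d q e = bStruct (xs.drop i) (d, q, e) := by
  induction k with
  | zero =>
    intro xs i d q e hk
    have hge : ¬ i < xs.length := by omega
    rw [bLineLoop, if_neg hge, List.drop_eq_nil_of_le (by omega)]
    rfl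
  | succ k ih =>
    intro xs i d q e hk
    by_cases h : i < xs.length
    case neg =>
      rw [bLineLoop, if_neg h, List.drop_eq_nil_of_le (by omega)]
      rfl
    case pos =>
    have hd : xs.drop i = xs[i] :: xs.drop (i + 1) := List.drop_eq_getElem_cons h
    have hget : xs.getD i ' ' = xs[i] := List.getD_eq_getElem _ ' ' h
    have hiff : (i + 1 < xs.length ∧ xs.getD (i + 1) ' ' = '/') ↔
        (xs.drop (i + 1)).head? = some '/' := by
      rw [List.head?_drop]
      constructor
      · rintro ⟨h1, h2⟩
        rw [List.getElem?_eq_getElem h1, ← List.getD_eq_getElem _ ' ' h1, h2]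
      · intro hh
        have h1 : i + 1 < xs.length := by
          by_contra h1
          rw [List.getElem?_eq_none (by omega)] at hh
          simp at hh
        refine ⟨h1, ?_⟩
        rw [List.getElem?_eq_getElem h1] at hh
        rw [List.getD_eq_getElem _ ' ' h1]
        exact Option.some.inj hh
    have hk1 : xs.length - (i + 1) ≤ k := by omega
    rw [bLineLoop, if_pos h, hd]
    simp only [bStruct, hget, hiff]
    split_ifs <;> first | rfl | exact ih xs (i + 1) _ _ _ hk1

theorem bLineLoop_eq_bStruct (xs : List Char) (d : Int) (q : Option Char) (e : Bool) :
    bLineLoop xs xs.length 0 d q e = bStruct xs (d, q, e) := by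
  simpa using bLineLoop_eq_bStruct_aux xs.length xs 0 d q e (by omega)

theorem foldl_eq_gLines (ls : List (List Char)) (st : Int × Option Char × Bool) :
    (ls.foldl (fun (st : Int × Option Char × Bool) line =>
        bLineLoop line line.length 0 st.1 st.2.1 st.2.2) st).1 = gLines ls st := by
  induction ls generalizing st with
  | nil => rfl
  | cons l ls ih =>
    simp only [List.foldl_cons, gLines, ih]
    have : bLineLoop l l.length 0 st.1 st.2.1 st.2.2 = bStruct l (st.1, st.2.1, st.2.2) :=
      bLineLoop_eq_bStruct l st.1 st.2.1 st.2.2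
    rw [this]

theorem sing_eq_slash (c : Char) : (String.singleton c = "/") ↔ (c = '/') := by
  constructor
  · intro h; have := congrArg String.toList h; simpa using this
  · intro h; subst h; rfl

-- head of the first line of splitOn = head of the text, unless the text starts with '\n'
theorem splitOn_headI_head? (cs : List Char) (hne : cs.head? ≠ some '\n') :
    ((cs.splitOn '\n').headI).head? = cs.head? := by
  cases cs with
  | nil => simp [List.splitOn, List.splitOnP_nil]
  | cons c rest =>
    have hc : c ≠ '\n' := by simpa using hne
    simp only [List.splitOn, List.splitOnP_cons, beq_iff_eq, if_neg hc]
    obtain ⟨L, ls, hL⟩ := List.exists_cons_of_ne_nil (List.splitOnP_ne_nil _ rest)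
    rw [hL]
    simp

-- the simulation invariant: A's loop, started in each reachable state on the suffix cs,
-- equals B's line scanner on cs.splitOn '\n' from the corresponding state.
def pvInv (cs : List Char) : Prop :=
  (∀ d p, (p = "/" → cs.head? ≠ some '/') →
      aLoop d none false false p cs = gLines (cs.splitOn '\n') (d, none, false)) ∧
  (∀ q d p, (q = '"' ∨ q = '\'' ∨ q = '`') →
      aLoop d (some q) false false p cs = gLines (cs.splitOn '\n') (d, some q, false)) ∧
  (∀ q d p, (q = '"' ∨ q = '\'' ∨ q = '`') →
      aLoop d (some q) true false p cs = gLines (cs.splitOn '\n') (d, some q, true)) ∧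
  (∀ d p, aLoop d none false true p cs = gLines (cs.splitOn '\n').tail (d, none, false))

theorem pvInv_nil : pvInv [] := by
  refine ⟨?_, ?_, ?_, ?_⟩ <;>
    intros <;> simp [aLoop, List.splitOn, List.splitOnP_nil, gLines, bStruct]

theorem bStruct_cons_q (c : Char) (L : List Char) (d : Int)
    (hq : c = '"' ∨ c = '\'' ∨ c = '`') :
    bStruct (c :: L) (d, none, false) = bStruct L (d, some c, false) := by
  simp only [bStruct]
  rw [if_neg (by simp), if_neg (by simp), if_pos hq]

theorem inv_holds (k : Nat) : ∀ cs : List Char, cs.length ≤ k → pvInv cs := by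
  induction k with
  | zero =>
    intro cs h
    have : cs = [] := List.eq_nil_of_length_eq_zero (by omega)
    simpa [this] using pvInv_nil
  | succ k ih =>
    intro cs hlen
    cases cs with
    | nil => exact pvInv_nil
    | cons c rest =>
    have hrest : rest.length ≤ k := by simpa using hlen
    obtain ⟨L, ls, hL⟩ := List.exists_cons_of_ne_nil (List.splitOnP_ne_nil (· == '\n') rest)
    have hLsplit : rest.splitOn '\n' = L :: ls := hL
    have hsplit : ∀ x : Char, x ≠ '\n' → (x :: rest).splitOn '\n' = (x :: L) :: ls := by
      intro x hx
      simp only [List.splitOn, List.splitOnP_cons, beq_iff_eq, if_neg hx]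
      rw [hL]
      rfl
    have hsplitNl : ('\n' :: rest).splitOn '\n' = [] :: rest.splitOn '\n' := by
      simp [List.splitOn, List.splitOnP_cons]
    have hLhead : rest.head? ≠ some '\n' → L.head? = rest.head? := by
      intro hne
      have := splitOn_headI_head? rest hne
      rw [hLsplit] at this
      simpa using this
    have hlsTail : ls = (rest.splitOn '\n').tail := by rw [hLsplit]; rfl
    refine ⟨?_, ?_, ?_, ?_⟩
    -- (1) normal mode
    · intro d p hp
      by_cases hnl : c = '\n'
      · subst hnl
        rw [hsplitNl]
        simp only [aLoop, gLines, bStruct]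
        exact (ih rest hrest).1 d "" (by simp)
      rw [hsplit c hnl, gLines]
      by_cases hq : c = '"' ∨ c = '\'' ∨ c = '`'
      · simp only [aLoop]
        simp [hq, hnl]
        rw [bStruct_cons_q c L d hq]
        have := (ih rest hrest).2.1 c d (String.singleton c) hq
        rw [hLsplit] at this
        simpa [gLines] using this
      by_cases hsl : c = '/'
      · subst hsl
        have hpne : p ≠ "/" := fun hp' => absurd (by simp) (hp hp')
        by_cases hnext : rest.head? = some '/'
        · -- "//": A takes two steps into comment mode; B breaks out of the line
          obtain ⟨rest', hrest'⟩ : ∃ rest', rest = '/' :: rest' := by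
            cases rest with
            | nil => simp at hnext
            | cons a b => simp at hnext; exact ⟨b, by rw [hnext]⟩
          subst hrest'
          have hrest2 : rest'.length ≤ k := by simp at hrest; omega
          have hLh : L.head? = some '/' := by rw [hLhead (by simp)]; rfl
          have hstep : aLoop d none false false p ('/' :: '/' :: rest') =
              aLoop d none false true "/" rest' := by
            simp only [aLoop]
            simp [hpne, sing_eq_slash]
            rfl
          rw [hstep]
          rw [show bStruct ('/' :: L) (d, none, false) = (d, none, false) from by
            simp [bStruct, hLh]]
          have hA := (ih rest' hrest2).2.2.2 d "/"
          rw [hA]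
          have : ls = (rest'.splitOn '\n').tail := by
            obtain ⟨L', ls', hL'⟩ :=
              List.exists_cons_of_ne_nil (List.splitOnP_ne_nil (· == '\n') rest')
            have h2 : ('/' :: rest').splitOn '\n' = ('/' :: L') :: ls' := by
              simp only [List.splitOn, List.splitOnP_cons, beq_iff_eq, if_neg (by decide : ('/' : Char) ≠ '\n')]
              rw [hL']
              rfl
            rw [h2] at hLsplit
            have hls : ls = ls' := by injection hLsplit with _ h3; exact h3.symm
            have hL'' : rest'.splitOn '\n' = L' :: ls' := hL'
            rw [hls, hL'']
            rfl
          rw [this]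
        · -- single '/': an ordinary character for both
          have hLh : L.head? ≠ some '/' := by
            by_cases hr : rest.head? = some '\n'
            · obtain ⟨b, hb⟩ : ∃ b, rest = '\n' :: b := by
                cases rest with
                | nil => simp at hr
                | cons a b => simp at hr; exact ⟨b, by rw [hr]⟩
              subst hb
              have h0 : ([] : List Char) :: b.splitOn '\n' = L :: ls := by
                rw [← hLsplit]
                simp [List.splitOn, List.splitOnP_cons]
              have : L = [] := by injection h0 with h1 _; exact h1.symm
              simp [this]
            · rw [hLhead hr]; exact hnext
          simp only [aLoop]
          simp [hpne]
          rw [show bStruct ('/' :: L) (d, none, false) = bStruct L (d, none, false) from by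
            simp [bStruct, hLh]]
          have := (ih rest hrest).1 d (String.singleton '/') (fun _ => hnext)
          rw [hLsplit] at this
          simpa [gLines] using this
      by_cases hob : c = '{'
      · subst hob
        simp only [aLoop]
        simp
        rw [show bStruct ('{' :: L) (d, none, false) = bStruct L (d + 1, none, false) from by
          simp [bStruct]]
        have := (ih rest hrest).1 (d + 1) (String.singleton '{') (by simp [sing_eq_slash])
        rw [hLsplit] at this
        simpa [gLines] using this
      by_cases hcb : c = '}'
      · subst hcb
        simp only [aLoop]
        simp
        rw [show bStruct ('}' :: L) (d, none, false) = bStruct L (d - 1, none, false) from by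
          simp [bStruct]]
        have := (ih rest hrest).1 (d - 1) (String.singleton '}') (by simp [sing_eq_slash])
        rw [hLsplit] at this
        simpa [gLines] using this
      · simp only [aLoop]
        simp [hnl, hq, hsl, hob, hcb]
        rw [show bStruct (c :: L) (d, none, false) = bStruct L (d, none, false) from by
          simp [bStruct, hq, hsl, hob, hcb]]
        have := (ih rest hrest).1 d (String.singleton c)
          (by rw [sing_eq_slash] at *; intro hco; exact absurd hco hsl)
        rw [hLsplit] at this
        simpa [gLines] using this
    -- (2) string mode, escape = false
    · intro q d p hq
      have hqb : q ≠ '\\' := by rcases hq with h|h|h <;> simp [h]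
      have hqs : q ≠ '/' := by rcases hq with h|h|h <;> simp [h]
      by_cases hnl : c = '\n'
      · subst hnl
        rw [hsplitNl]
        simp only [aLoop, gLines, bStruct]
        exact (ih rest hrest).2.1 q d "" hq
      rw [hsplit c hnl, gLines]
      by_cases hbs : c = '\\'
      · subst hbs
        simp only [aLoop]
        simp
        rw [show bStruct ('\\' :: L) (d, some q, false) = bStruct L (d, some q, true) from by
          simp [bStruct]]
        have := (ih rest hrest).2.2.1 q d (String.singleton '\\') hq
        rw [hLsplit] at this
        simpa [gLines] using this
      by_cases hcq : c = q
      · subst hcq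
        simp only [aLoop]
        simp [hnl, hbs]
        rw [show bStruct (c :: L) (d, some c, false) = bStruct L (d, none, false) from by
          simp [bStruct, hbs]]
        have := (ih rest hrest).1 d (String.singleton c)
          (by rw [sing_eq_slash] at *; intro hco; exact absurd hco hqs)
        rw [hLsplit] at this
        simpa [gLines] using this
      · simp only [aLoop]
        simp [hnl, hbs, hcq]
        rw [show bStruct (c :: L) (d, some q, false) = bStruct L (d, some q, false) from by
          simp [bStruct, hbs, hcq]]
        have := (ih rest hrest).2.1 q d (String.singleton c) hq
        rw [hLsplit] at this
        simpa [gLines] using this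
    -- (3) string mode, escape = true
    · intro q d p hq
      by_cases hnl : c = '\n'
      · subst hnl
        rw [hsplitNl]
        simp only [aLoop, gLines, bStruct]
        exact (ih rest hrest).2.2.1 q d "" hq
      · rw [hsplit c hnl, gLines]
        simp only [aLoop]
        simp [hnl]
        rw [show bStruct (c :: L) (d, some q, true) = bStruct L (d, some q, false) from by
          simp [bStruct]]
        have := (ih rest hrest).2.1 q d (String.singleton c) hq
        rw [hLsplit] at this
        simpa [gLines] using this
    -- (4) comment mode
    · intro d p
      by_cases hnl : c = '\n'
      · subst hnl
        rw [hsplitNl]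
        simp only [aLoop, List.tail_cons]
        exact (ih rest hrest).1 d "" (by simp)
      · simp only [aLoop]
        simp [hnl]
        rw [hsplit c hnl, List.tail_cons, hlsTail]
        exact (ih rest hrest).2.2.2 d (String.singleton c)

theorem check_brace_depth_spec : Claim_equal_check_brace_depth := by
  intro s _
  unfold Spec_check_brace_depth check_brace_depth check_brace_depth_alt
  rw [foldl_eq_gLines]
  exact (inv_holds s.toList.length s.toList le_rfl).1 0 "" (by simp)
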